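-- pv_equiv track=rewrite | github.com/hanwool77/codingtest | 1011/PRO_호텔방배정_효율성실패.py | solution
-- ===== SOURCE A (Python) =====
-- def solution(k, room_number):
--     answer = []
--     room = [False] * (k + 1)
--     for r in room_number:
--         for i in range(1, k + 1):
--             if i >= r and not room[i]:
--                 room[i] = True
--                 answer.append(i)
--                 break
--     return answer
-- ===== SOURCE B (Python) =====
-- def solution(k, room_number):
--     # union-find "next free room" forest: occupied room -> next candidate room
--     nxt = {}
--     answer = []
--     for r in room_number:
--         x = r if r >= 1 else 1
--         path = []
--         while x in nxt:
--             path.append(x)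
--             x = nxt[x]
--         for p in path:          # path compression
--             nxt[p] = x
--         if x <= k:
--             answer.append(x)
--             nxt[x] = x + 1
--     return answer
-- ===== Notes on version B (the rewrite author's own statement) =====
-- stated objective: faster
-- what changed: Replaced A's per-request linear scan of all rooms 1..k by a union-find 'next free room' forest (dict room -> next candidate) with path compression, so each request chases and collapses pointers instead of rescanning.
import Mathlib
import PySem

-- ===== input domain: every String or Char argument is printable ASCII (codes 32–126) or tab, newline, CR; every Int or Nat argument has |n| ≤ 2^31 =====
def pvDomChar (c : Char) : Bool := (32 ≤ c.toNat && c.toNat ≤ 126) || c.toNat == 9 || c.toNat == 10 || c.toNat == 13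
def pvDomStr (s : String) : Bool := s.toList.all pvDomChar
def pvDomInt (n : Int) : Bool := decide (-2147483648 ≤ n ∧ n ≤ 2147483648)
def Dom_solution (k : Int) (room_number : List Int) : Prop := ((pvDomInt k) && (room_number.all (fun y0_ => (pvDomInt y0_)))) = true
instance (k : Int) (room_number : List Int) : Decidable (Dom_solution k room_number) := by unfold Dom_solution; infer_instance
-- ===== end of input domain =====

-- B replaces A's per-request scan of all rooms 1..k by a union-find
-- "next free room" forest with path compression (objective: faster).

-- ===== PORT A =====
-- inner loop 'for i in range(1, k+1): if i >= r and not room[i]: … break'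
-- (room[i] is always in range for i in the scanned range, so the pyGetD default is never read)
def solFind (room : List Bool) (r : Int) : List Int → Option Int
  | [] => none
  | i :: is =>
    if i ≥ r ∧ PySem.List.pyGetD room i true = false then some i else solFind room r is

def solution (k : Int) (room_number : List Int) : List Int :=
  (room_number.foldl (fun (st : List Int × List Bool) r =>
      match solFind st.2 r (PySem.List.pyRange 1 (k + 1) 1) with
      | none => st
      | some i => (st.1 ++ [i], PySem.List.pySetD st.2 i true))
    ([], List.replicate (k + 1).toNat false)).1

-- ===== PORT B =====
-- 'while x in nxt: path.append(x); x = nxt[x]' — fuel (nxt.size + 1) only makes the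
-- loop total; under the forest invariant the chase visits distinct keys, so it never runs out
def chase (d : PySem.Dict Int Int) : Int → List Int → Nat → Int × List Int
  | x, path, 0 => (x, path)
  | x, path, fuel + 1 =>
    match d.get? x with
    | none => (x, path)
    | some y => chase d y (path ++ [x]) fuel

def solution_alt (k : Int) (room_number : List Int) : List Int :=
  (room_number.foldl (fun (st : List Int × PySem.Dict Int Int) r =>
      let x0 : Int := if r ≥ 1 then r else 1
      let res := chase st.2 x0 [] (st.2.size + 1)
      let nxt := res.2.foldl (fun d p => d.insert p res.1) st.2
      if res.1 ≤ k then (st.1 ++ [res.1], nxt.insert res.1 (res.1 + 1)) else (st.1, nxt))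
    ([], PySem.Dict.empty)).1

-- ===== PRECONDITION & SPEC =====
def Spec_solution (k : Int) (room_number : List Int) (out : List Int) : Prop := out = solution_alt k room_number
instance (k : Int) (room_number : List Int) (out : List Int) : Decidable (Spec_solution k room_number out) := by unfold Spec_solution; infer_instance

-- ===== CLAIM (what is proved, stated in full; the proofs are below) =====
def Claim_equal_solution : Prop := ∀ (k : Int) (room_number : List Int), Dom_solution k room_number → Spec_solution k room_number (solution k room_number)

-- ===== LEMMAS AND PROOFS =====

-- the union-find forest invariant: every edge x ↦ y points strictly forward and
-- every room in [x, y) is occupied (is a key)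
def UFInv (d : PySem.Dict Int Int) : Prop :=
  ∀ x y, d.get? x = some y → x < y ∧ ∀ z, x ≤ z → z < y → d.get? z ≠ none

-- all keys are rooms 1..k
def UFBnd (k : Int) (d : PySem.Dict Int Int) : Prop :=
  ∀ x, d.get? x ≠ none → 1 ≤ x ∧ x ≤ k

-- A's boolean array and B's dict describe the same occupied set
def UFRel (k : Int) (room : List Bool) (d : PySem.Dict Int Int) : Prop :=
  room.length = (k + 1).toNat ∧
  ∀ i : Int, 1 ≤ i → i ≤ k → (PySem.List.pyGetD room i true = true ↔ d.get? i ≠ none)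

def UFGood (k : Int) (room : List Bool) (d : PySem.Dict Int Int) : Prop :=
  UFInv d ∧ UFBnd k d ∧ UFRel k room d

lemma chase_spec (d : PySem.Dict Int Int) (hInv : UFInv d) :
    ∀ (fuel : Nat) (x : Int) (acc : List Int),
      (d.keys.filter (fun z => x ≤ z)).length < fuel →
      d.get? (chase d x acc fuel).1 = none ∧
      x ≤ (chase d x acc fuel).1 ∧
      (∀ z, x ≤ z → z < (chase d x acc fuel).1 → d.get? z ≠ none) ∧
      (∀ e ∈ (chase d x acc fuel).2, e ∈ acc ∨ (x ≤ e ∧ e < (chase d x acc fuel).1 ∧ d.get? e ≠ none)) := by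
  intro fuel
  induction fuel with
  | zero => intro x acc h; omega
  | succ f ih =>
    intro x acc hfuel
    cases hx : d.get? x with
    | none =>
      simp only [chase, hx]
      refine ⟨?_, ?_, ?_, ?_⟩ <;> first
        | trivial
        | exact hx
        | exact le_refl x
        | (intro z h1 h2; omega)
        | (intro e he; exact Or.inl he)
    | some y =>
      have hxy : x < y := (hInv x y hx).1
      have hxk : x ∈ d.keys := by
        have := PySem.Dict.get?_eq_none_iff_not_mem_keys (d := d) (k := x)
        simp [hx] at this; tauto
      have hmeas : (d.keys.filter (fun z => y ≤ z)).length < (d.keys.filter (fun z => x ≤ z)).length := by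
        have h1 : d.keys.filter (fun z => decide (y ≤ z)) =
            (d.keys.filter (fun z => decide (x ≤ z))).filter (fun z => decide (y ≤ z)) := by
          rw [List.filter_filter]
          apply List.filter_congr
          intro z _
          by_cases hz : y ≤ z
          · simp [hz]; omega
          · simp [hz]
        rw [h1]
        apply List.length_filter_lt_length_iff_exists.mpr
        exact ⟨x, by simp [hxk], by simp; omega⟩
      have hrec := ih y (acc ++ [x]) (by omega)
      simp only [chase, hx]
      obtain ⟨hfree, hge, hcov, hpath⟩ := hrec
      refine ⟨hfree, by omega, ?_, ?_⟩
      · intro z h1 h2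
        by_cases hz : y ≤ z
        · exact hcov z hz h2
        · exact (hInv x y hx).2 z h1 (by omega)
      · intro e he
        rcases hpath e he with hacc | hprop
        · rcases List.mem_append.mp hacc with h | h
          · exact Or.inl h
          · simp at h; subst h
            exact Or.inr ⟨le_refl e, by omega, by simp [hx]⟩
        · exact Or.inr ⟨by omega, hprop.2.1, hprop.2.2⟩

lemma foldl_insert_const_get? (rt : Int) (path : List Int) (d : PySem.Dict Int Int) (z : Int) :
    (path.foldl (fun d p => d.insert p rt) d).get? z = if z ∈ path then some rt else d.get? z := by
  induction path generalizing d with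
  | nil => simp
  | cons p ps ih =>
    simp only [List.foldl_cons, ih, List.mem_cons]
    by_cases hz : z ∈ ps
    · simp [hz]
    · by_cases hzp : z = p
      · subst hzp; simp [hz, PySem.Dict.get?_insert_self]
      · simp [hz, hzp, PySem.Dict.get?_insert_of_ne _ _ hzp]

-- A's inner scan lands exactly on the chase result (or nothing, if it is past room k)
lemma scan_eq (k r x rt : Int) (room : List Bool) (d : PySem.Dict Int Int)
    (hx : x = if r ≥ 1 then r else 1)
    (hrel : UFRel k room d)
    (hrt_free : d.get? rt = none) (hrt_ge : x ≤ rt)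
    (hcov : ∀ z, x ≤ z → z < rt → d.get? z ≠ none) :
    ∀ a : Int, 1 ≤ a → a ≤ rt →
      solFind room r (PySem.List.pyRange a (k + 1) 1) =
        if rt ≤ k then some rt else none := by
  have key : ∀ (n : Nat) (a : Int), (k + 1 - a).toNat = n → 1 ≤ a → a ≤ rt →
      solFind room r (PySem.List.pyRange a (k + 1) 1) =
        if rt ≤ k then some rt else none := by
    intro n
    induction n with
    | zero =>
      intro a hn ha1 hart
      rw [PySem.List.pyRange_one_eq_nil (by omega)]
      simp only [solFind]
      rw [if_neg (by omega)]
    | succ m ih =>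
      intro a hn ha1 hart
      have hak : a ≤ k := by omega
      rw [PySem.List.pyRange_one_cons (by omega)]
      simp only [solFind]
      by_cases heq : a = rt
      · subst heq
        rw [if_pos, if_pos hak]
        constructor
        · by_cases hr : r ≥ 1 <;> simp [hx, hr] at hrt_ge ⊢ <;> omega
        · have hiff := (hrel.2 a ha1 hak)
          cases hb : PySem.List.pyGetD room a true with
          | true => exact absurd (hiff.mp hb) (by simp [hrt_free])
          | false => rfl
      · have halt : a < rt := by omega
        rw [if_neg, ih (a + 1) (by omega) (by omega) (by omega)]
        rintro ⟨har, hfree⟩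
        by_cases hax : x ≤ a
        · have := hcov a hax halt
          have hiff := (hrel.2 a ha1 hak)
          rw [hiff.mpr this] at hfree
          exact Bool.noConfusion hfree
        · have hr1 : r ≥ 1 := by
            by_contra hr
            simp [hx, hr] at hax; omega
          simp [hx, hr1] at hax
          omega
  intro a
  exact key (k + 1 - a).toNat a rfl

lemma good_step (k r : Int) (room : List Bool) (d : PySem.Dict Int Int) (hg : UFGood k room d) :
    let x0 : Int := if r ≥ 1 then r else 1
    let res := chase d x0 [] (d.size + 1)
    let d' := res.2.foldl (fun d p => d.insert p res.1) d
    (solFind room r (PySem.List.pyRange 1 (k + 1) 1) = if res.1 ≤ k then some res.1 else none) ∧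
    (res.1 ≤ k → UFGood k (PySem.List.pySetD room res.1 true) (d'.insert res.1 (res.1 + 1))) ∧
    (¬ res.1 ≤ k → UFGood k room d') := by
  obtain ⟨hInv, hBnd, hrel⟩ := hg
  intro x0 res d'
  have hx01 : 1 ≤ x0 := by by_cases hr : r ≥ 1 <;> simp [x0, hr]
  have hmeas : (d.keys.filter (fun z => x0 ≤ z)).length < d.size + 1 := by
    have h1 : (d.keys.filter (fun z => x0 ≤ z)).length ≤ d.keys.length := List.length_filter_le _ _
    have h2 : d.keys.length = d.size := by simp [PySem.Dict.keys, PySem.Dict.size]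
    omega
  obtain ⟨hfree, hge, hcov, hpath⟩ := chase_spec d hInv (d.size + 1) x0 [] hmeas
  have hfree : d.get? res.1 = none := hfree
  have hge : x0 ≤ res.1 := hge
  have hcov : ∀ z, x0 ≤ z → z < res.1 → d.get? z ≠ none := hcov
  have hpath : ∀ e ∈ res.2, e ∈ ([] : List Int) ∨ (x0 ≤ e ∧ e < res.1 ∧ d.get? e ≠ none) := hpath
  have hpath' : ∀ e ∈ res.2, x0 ≤ e ∧ e < res.1 ∧ d.get? e ≠ none := by
    intro e he
    rcases hpath e he with h | h
    · simp at h
    · exact h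
  have hget' : ∀ z, d'.get? z = if z ∈ res.2 then some res.1 else d.get? z :=
    fun z => foldl_insert_const_get? res.1 res.2 d z
  have hK : ∀ z, d'.get? z ≠ none ↔ d.get? z ≠ none := by
    intro z
    rw [hget' z]
    by_cases hz : z ∈ res.2
    · simp [hz, (hpath' z hz).2.2]
    · simp [hz]
  have hInv' : UFInv d' := by
    intro a b hab
    rw [hget' a] at hab
    by_cases ha : a ∈ res.2
    · rw [if_pos ha] at hab
      obtain ⟨ha1, ha2, _⟩ := hpath' a ha
      have hb : b = res.1 := by injection hab; omega
      subst hb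
      exact ⟨ha2, fun z hz1 hz2 => (hK z).mpr (hcov z (by omega) hz2)⟩
    · rw [if_neg ha] at hab
      obtain ⟨h1, h2⟩ := hInv a b hab
      exact ⟨h1, fun z hz1 hz2 => (hK z).mpr (h2 z hz1 hz2)⟩
  have hBnd' : UFBnd k d' := fun z hz => hBnd z ((hK z).mp hz)
  have hrel' : UFRel k room d' := by
    refine ⟨hrel.1, fun i hi1 hi2 => ?_⟩
    rw [hrel.2 i hi1 hi2]
    exact (hK i).symm
  refine ⟨?_, ?_, fun h => ⟨hInv', hBnd', hrel'⟩⟩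
  · exact scan_eq k r x0 res.1 room d rfl hrel hfree hge hcov 1 le_rfl (by omega)
  · intro hrk
    have hrt1 : 1 ≤ res.1 := by omega
    have hget3 : ∀ z, (d'.insert res.1 (res.1 + 1)).get? z =
        if z = res.1 then some (res.1 + 1) else d'.get? z := by
      intro z
      exact PySem.Dict.get?_insert (d := d') (k := res.1) (v := res.1 + 1) (k' := z)
    refine ⟨?_, ?_, ?_⟩
    · intro a b hab
      rw [hget3 a] at hab
      by_cases ha : a = res.1
      · rw [if_pos ha] at hab
        have hb : b = res.1 + 1 := by injection hab; omega
        subst ha; subst hb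
        refine ⟨by omega, fun z hz1 hz2 => ?_⟩
        have hz : z = res.1 := by omega
        subst hz
        simp [hget3]
      · rw [if_neg ha] at hab
        obtain ⟨h1, h2⟩ := hInv' a b hab
        refine ⟨h1, fun z hz1 hz2 => ?_⟩
        rw [hget3 z]
        by_cases hzz : z = res.1
        · simp [hzz]
        · rw [if_neg hzz]; exact h2 z hz1 hz2
    · intro z hz
      rw [hget3 z] at hz
      by_cases hzz : z = res.1
      · subst hzz; omega
      · exact hBnd' z (by rwa [if_neg hzz] at hz)
    · constructor
      · rw [PySem.List.pySetD_of_nonneg _ _ (by omega), List.length_set]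
        exact hrel.1
      · intro i hi1 hi2
        rw [PySem.List.pySetD_of_nonneg _ _ (by omega)]
        have hilen : i.toNat < room.length := by
          rw [hrel.1]; omega
        rw [PySem.List.pyGetD_eq_getElem _ _ (by omega) (by simp only [List.length_set]; rw [hrel.1]; omega)]
        rw [hget3 i]
        simp only [List.getElem_set]
        by_cases hir : i = res.1
        · subst hir
          simp
        · rw [if_neg (fun h => hir (by omega)), if_neg hir]
          rw [← PySem.List.pyGetD_eq_getElem room true (by omega) (by rw [hrel.1]; omega)]
          exact (hrel'.2 i hi1 hi2)

lemma main_loop (k : Int) (l : List Int) :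
    ∀ (ans : List Int) (room : List Bool) (d : PySem.Dict Int Int), UFGood k room d →
      (l.foldl (fun (st : List Int × List Bool) r =>
          match solFind st.2 r (PySem.List.pyRange 1 (k + 1) 1) with
          | none => st
          | some i => (st.1 ++ [i], PySem.List.pySetD st.2 i true)) (ans, room)).1 =
      (l.foldl (fun (st : List Int × PySem.Dict Int Int) r =>
          let x0 : Int := if r ≥ 1 then r else 1
          let res := chase st.2 x0 [] (st.2.size + 1)
          let nxt := res.2.foldl (fun d p => d.insert p res.1) st.2
          if res.1 ≤ k then (st.1 ++ [res.1], nxt.insert res.1 (res.1 + 1)) else (st.1, nxt)) (ans, d)).1 := by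
  induction l with
  | nil => intro ans room d _; rfl
  | cons r l ih =>
    intro ans room d hg
    obtain ⟨hscan, hyes, hno⟩ := good_step k r room d hg
    simp only [List.foldl_cons, hscan]
    by_cases h : (chase d (if r ≥ 1 then r else 1) [] (d.size + 1)).1 ≤ k
    · simp only [if_pos h]
      exact ih _ _ _ (hyes h)
    · simp only [if_neg h]
      exact ih _ _ _ (hno h)

lemma good_init (k : Int) : UFGood k (List.replicate (k + 1).toNat false) PySem.Dict.empty := by
  refine ⟨?_, ?_, ?_, ?_⟩
  · intro x y h; simp [PySem.Dict.get?_empty] at h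
  · intro x h; simp [PySem.Dict.get?_empty] at h
  · simp
  · intro i hi1 hi2
    rw [PySem.List.pyGetD_eq_getElem _ _ (by omega) (by simp; omega)]
    simp [PySem.Dict.get?_empty]

-- ===== VERDICT (by name: the statement is the Claim_ definition above) =====
theorem solution_spec : Claim_equal_solution := by
  intro k room_number _
  unfold Spec_solution solution solution_alt
  exact main_loop k room_number [] _ _ (good_init k)
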